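-- pv_equiv track=rewrite | github.com/ariana9rande/Algorithm-Python | 프로그래머스/Level 1/문자열_나누기.py | solution
-- ===== SOURCE A (Python) =====
-- def solution(s):
--     answer = []
--     while s:
--         sameCnt = 0
--         diffCnt = 0
--         x = s[0]
--         temp = 0
--         for i in range(len(s)):
--             if s[i] == x:
--                 sameCnt += 1
--             else:
--                 diffCnt += 1
--
--             if sameCnt == diffCnt:
--                 temp = i
--                 break
--
--         if sameCnt == diffCnt:
--             answer.append(s[:temp + 1])
--             s = s[temp + 1:]
--         else:
--             answer.append(s)
--             break
--
--     return len(answer)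
-- ===== SOURCE B (Python) =====
-- def solution(s):
--     answer = 0
--     same = 0
--     diff = 0
--     x = ''
--     for c in s:
--         if same == diff:
--             answer += 1
--             x = c
--             same, diff = 1, 0
--         elif c == x:
--             same += 1
--         else:
--             diff += 1
--     return answer
-- ===== Notes on version B (the rewrite author's own statement) =====
-- stated objective: faster
-- what changed: Replaced the while loop that rescans and re-slices the string for each segment with one linear pass keeping same/diff counters and opening a new segment whenever they are equal.
import Mathlib
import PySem

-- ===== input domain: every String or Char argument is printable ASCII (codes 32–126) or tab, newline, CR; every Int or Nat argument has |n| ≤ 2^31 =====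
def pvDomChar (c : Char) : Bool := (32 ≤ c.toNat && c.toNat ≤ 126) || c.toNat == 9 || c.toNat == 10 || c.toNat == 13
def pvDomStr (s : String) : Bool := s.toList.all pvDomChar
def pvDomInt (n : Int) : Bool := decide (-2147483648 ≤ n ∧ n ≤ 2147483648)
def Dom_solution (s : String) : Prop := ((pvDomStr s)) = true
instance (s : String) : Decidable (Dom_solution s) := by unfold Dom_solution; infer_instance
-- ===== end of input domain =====

-- B replaces A's quadratic segment-by-segment rescan/slice loop with one linear pass over the
-- characters keeping same/diff counters (objective: faster, asymptotic O(n^2) -> O(n)).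

-- ===== PORT A =====
-- inner 'for i in range(len(s))' with break: returns the index i at which sameCnt == diffCnt first
-- holds (none if the loop finishes without the break ever firing, i.e. counts never balance)
def pvLoopA (x : Char) : Int → Int → Nat → List Char → Option Nat
  | _, _, _, [] => none
  | same, diff, i, c :: rest =>
    let same' := if c = x then same + 1 else same
    let diff' := if c = x then diff else diff + 1
    if same' = diff' then some i else pvLoopA x same' diff' (i + 1) rest

-- the outer 'while s:' loop of A; 'answer' is only used via len(answer), so the recursion
-- returns the count of appends directly
def pvSolAuxA (l : List Char) : Int :=
  match l with
  | [] => 0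
  | x :: rest =>
    match pvLoopA x 0 0 0 (x :: rest) with
    | some temp => 1 + pvSolAuxA ((x :: rest).drop (temp + 1))
    | none => 1
termination_by l.length
decreasing_by simp [List.length_drop]

def solution (s : String) : Int := pvSolAuxA s.toList

-- ===== PORT B =====
-- Python's x = '' sentinel is never compared before being overwritten (same == diff holds on the
-- first character), so it is ported as an arbitrary char ' '
def pvStep (st : Int × Int × Int × Char) (c : Char) : Int × Int × Int × Char :=
  match st with
  | (ans, same, diff, x) =>
    if same = diff then (ans + 1, 1, 0, c)
    else if c = x then (ans, same + 1, diff, x)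
    else (ans, same, diff + 1, x)

def solution_alt (s : String) : Int := (s.toList.foldl pvStep (0, 0, 0, ' ')).1

-- ===== PRECONDITION & SPEC =====
def Spec_solution (s : String) (out : Int) : Prop := out = solution_alt s
instance (s : String) (out : Int) : Decidable (Spec_solution s out) := by unfold Spec_solution; infer_instance

-- ===== CLAIM (what is proved, stated in full; the proofs are below) =====
def Claim_equal_solution : Prop := ∀ (s : String), Dom_solution s → Spec_solution s (solution s)

-- ===== LEMMAS AND PROOFS =====

-- pvLoopA's index accumulator only shifts the returned index
theorem pvLoopA_shift (x : Char) (l : List Char) :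
    ∀ (s d : Int) (i : Nat), pvLoopA x s d i l = (pvLoopA x s d 0 l).map (· + i) := by
  induction l with
  | nil => intro s d i; simp [pvLoopA]
  | cons c rest ih =>
    intro s d i
    simp only [pvLoopA]
    set s' := if c = x then s + 1 else s with hs'
    set d' := if c = x then d else d + 1 with hd'
    by_cases h : s' = d'
    · simp [h]
    · simp only [if_neg h]
      rw [ih s' d' (i + 1), ih s' d' 1, Option.map_map]
      congr 1
      funext j
      simp only [Function.comp_apply]
      omega

-- combined invariant, by induction on a length bound n:
-- (1) from a balanced state (same = diff) the fold counts exactly the segments of the rest, and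
-- (2) from an unbalanced mid-segment state the fold agrees with A's inner scan
theorem pvKey (n : Nat) :
    (∀ m : List Char, m.length ≤ n → ∀ (ans e : Int) (y : Char),
        (List.foldl pvStep (ans, e, e, y) m).1 = ans + pvSolAuxA m)
    ∧ (∀ l : List Char, l.length ≤ n → ∀ (x : Char) (s d ans : Int), s ≠ d →
        (List.foldl pvStep (ans, s, d, x) l).1 =
          match pvLoopA x s d 0 l with
          | some j => ans + pvSolAuxA (l.drop (j + 1))
          | none => ans) := by
  induction n with
  | zero =>
    constructor
    · intro m hm ans e y
      have : m = [] := List.eq_nil_of_length_eq_zero (Nat.le_zero.mp hm)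
      subst this; simp [pvSolAuxA.eq_def]
    · intro l hl x s d ans _
      have : l = [] := List.eq_nil_of_length_eq_zero (Nat.le_zero.mp hl)
      subst this; simp [pvLoopA]
  | succ n ih =>
    obtain ⟨ihB, ihM⟩ := ih
    constructor
    · -- balanced-state lemma
      intro m hm ans e y
      match m with
      | [] => simp [pvSolAuxA.eq_def]
      | c :: rest =>
        have hr : rest.length ≤ n := by simpa using Nat.succ_le_succ_iff.mp hm
        have hstep : pvStep (ans, e, e, y) c = (ans + 1, 1, 0, c) := by
          simp [pvStep]
        rw [List.foldl_cons, hstep, ihM rest hr c 1 0 (ans + 1) (by norm_num)]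
        have hloop : pvLoopA c 0 0 0 (c :: rest) = (pvLoopA c 1 0 0 rest).map (· + 1) := by
          simp only [pvLoopA]
          norm_num
          exact pvLoopA_shift c rest 1 0 1
        rw [pvSolAuxA.eq_def]
        simp only [hloop]
        cases h : pvLoopA c 1 0 0 rest with
        | none => simp
        | some j =>
          simp only [Option.map_some, List.drop_succ_cons]
          ring
    · -- mid-segment lemma
      intro l hl x s d ans hsd
      match l with
      | [] => simp [pvLoopA]
      | c :: rest =>
        have hr : rest.length ≤ n := by simpa using Nat.succ_le_succ_iff.mp hl
        have hstep : pvStep (ans, s, d, x) c =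
            (ans, (if c = x then s + 1 else s), (if c = x then d else d + 1), x) := by
          simp only [pvStep, if_neg hsd]
          split <;> simp
        rw [List.foldl_cons, hstep]
        simp only [pvLoopA]
        set s' := if c = x then s + 1 else s with hs'
        set d' := if c = x then d else d + 1 with hd'
        by_cases hbal : s' = d'
        · simp only [if_pos hbal]
          rw [hbal, ihB rest hr ans d' x]
          simp
        · simp only [if_neg hbal]
          rw [ihM rest hr x s' d' ans hbal, pvLoopA_shift x rest s' d' 1]
          cases h : pvLoopA x s' d' 0 rest with
          | none => simp
          | some j => simp

theorem solution_eq_alt (s : String) : solution s = solution_alt s := by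
  have := (pvKey s.toList.length).1 s.toList le_rfl 0 0 ' '
  simp [solution, solution_alt, this]

-- ===== VERDICT (by name: the statement is the Claim_ definition above) =====
theorem solution_spec : Claim_equal_solution := by
  intro s _
  unfold Spec_solution
  exact solution_eq_alt s
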